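-- pv_equiv track=rewrite | github.com/tuan882612/LeetCode | 2067-number-of-equal-count-substrings/2067-number-of-equal-count-substrings.py | equalCountSubstrings
-- ===== SOURCE A (Python) =====
-- import collections
--
-- def equalCountSubstrings(s: str, count: int) -> int:
--     unique = min(len(set(s)), len(s) // count)
--     hash = collections.Counter()
--     res = 0
--
--     for i in range(1, unique + 1):
--         size = count * i
--         temp_count = 0
--
--         for j, a in enumerate(s):
--             hash[a] += 1
--             temp_count += hash[a] == count
--
--             if j >= size:
--                 temp_count -= hash[s[j - size]] == count
--                 hash[s[j - size]] -= 1
--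
--             if temp_count == i:
--                 res += 1
--
--         hash.clear()
--     return res
-- ===== SOURCE B (Python) =====
-- import collections
--
-- def equalCountSubstrings(s: str, count: int) -> int:
--     res = 0
--     for i in range(1, len(s) // count + 1):
--         size = count * i
--         for start in range(len(s) - size + 1):
--             window = collections.Counter(s[start:start + size])
--             res += all(v == count for v in window.values())
--     return res
-- ===== Notes on version B (the rewrite author's own statement) =====
-- stated objective: simpler
-- what changed: B drops A's incremental sliding-window counter with its temp_count bookkeeping and len(set(s)) cap and instead, for each admissible window size count*i, rebuilds a fresh Counter of every window s[start:start+size] and checks all(v == count) directly.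
import Mathlib
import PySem

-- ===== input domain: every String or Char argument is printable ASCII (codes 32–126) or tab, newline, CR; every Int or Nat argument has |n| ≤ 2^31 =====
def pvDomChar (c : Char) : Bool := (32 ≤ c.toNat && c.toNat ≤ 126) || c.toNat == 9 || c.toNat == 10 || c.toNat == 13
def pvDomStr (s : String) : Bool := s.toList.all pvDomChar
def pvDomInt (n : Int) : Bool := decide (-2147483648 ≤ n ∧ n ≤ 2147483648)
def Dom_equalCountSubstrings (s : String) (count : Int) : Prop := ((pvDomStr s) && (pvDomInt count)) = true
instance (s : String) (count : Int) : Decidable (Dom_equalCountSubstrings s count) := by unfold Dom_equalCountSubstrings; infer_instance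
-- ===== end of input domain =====

-- B replaces A's incremental sliding-window counter bookkeeping by a naive fresh-Counter check of each window (simpler; not faster).


-- ===== PORT A =====
-- one step of A's inner loop: add s[j], maybe evict s[j-size], bump res when temp_count == i
def stepA (cs : List Char) (count size i : Int)
    (st : PySem.Dict Char Int × Int × Int) (ja : Int × Char) :
    PySem.Dict Char Int × Int × Int :=
  let hash := st.1.modify ja.2 0 (· + 1)
  let temp := st.2.1 + (if hash.getD ja.2 0 = count then 1 else 0)
  let hashtemp :=
    if size ≤ ja.1 then
      -- index ja.1 - size is in range whenever this branch runs (0 < size ≤ ja.1 < len), so the default is unreachable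
      let c := PySem.List.pyGetD cs (ja.1 - size) ' '
      (hash.modify c 0 (· - 1), temp - (if hash.getD c 0 = count then 1 else 0))
    else (hash, temp)
  (hashtemp.1, hashtemp.2, if hashtemp.2 = i then st.2.2 + 1 else st.2.2)

-- A's inner 'for j, a in enumerate(s)' loop, from a fresh Counter (hash.clear())
def bodyA (cs : List Char) (count i res : Int) : Int :=
  ((PySem.List.enumerate cs).foldl (stepA cs count (count * i) i) (PySem.Dict.empty, 0, res)).2.2

def equalCountSubstrings (s : String) (count : Int) : Int :=
  let cs := s.toList
  let unique : Int := min ((PySem.Set.ofList cs).length : Int) (PySem.Int.floordiv (cs.length : Int) count)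
  (PySem.List.pyRange 1 (unique + 1) 1).foldl (fun res i => bodyA cs count i res) 0

-- ===== PORT B =====
-- B's inner loop: slide a fixed-size window by its start, rebuilding a fresh Counter each time
def bodyB (cs : List Char) (count i res : Int) : Int :=
  let size := count * i
  (PySem.List.pyRange 0 ((cs.length : Int) - size + 1) 1).foldl (fun res start =>
    let window := PySem.Dict.counter (PySem.List.slice cs (some start) (some (start + size)))
    res + (if window.values.all (fun v => v = count) then 1 else 0)) res

def equalCountSubstrings_alt (s : String) (count : Int) : Int :=
  let cs := s.toList
  (PySem.List.pyRange 1 (PySem.Int.floordiv (cs.length : Int) count + 1) 1).foldl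
    (fun res i => bodyB cs count i res) 0

-- ===== PRECONDITION & SPEC =====
-- Pre_ excludes exactly count = 0, where Python A (and B) raises ZeroDivisionError on len(s) // count.
def Pre_equalCountSubstrings (s : String) (count : Int) : Prop := count ≠ 0
instance (s : String) (count : Int) : Decidable (Pre_equalCountSubstrings s count) := by
  unfold Pre_equalCountSubstrings; infer_instance

def pvWitness_equalCountSubstrings : String × Int := ("aabbab", 2)

def Spec_equalCountSubstrings (s : String) (count : Int) (out : Int) : Prop := out = equalCountSubstrings_alt s count
instance (s : String) (count : Int) (out : Int) : Decidable (Spec_equalCountSubstrings s count out) := by unfold Spec_equalCountSubstrings; infer_instance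

-- ===== CLAIM (what is proved, stated in full; the proofs are below) =====
def Claim_equal_equalCountSubstrings : Prop := ∀ (s : String) (count : Int), Dom_equalCountSubstrings s count → Pre_equalCountSubstrings s count → Spec_equalCountSubstrings s count (equalCountSubstrings s count)

-- ===== LEMMAS AND PROOFS =====

-- the window of size `size` ending at the right edge of the processed prefix p
def winP (p : List Char) (size : Nat) : List Char := p.drop (p.length - size)

-- number of chars (drawn from cs) whose multiplicity in w is ≥ k, as Int (A's temp_count)
def Tcnt (cs w : List Char) (k : Nat) : Int :=
  ∑ c ∈ cs.toFinset, (if k ≤ w.count c then (1 : Int) else 0)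

-- "every char present in w occurs exactly k times"
abbrev goodW (w : List Char) (k : Nat) : Prop := ∀ c ∈ w, w.count c = k

-- the window of size `size` starting at st
def slw (cs : List Char) (size st : Nat) : List Char := (cs.drop st).take size

-- number of good full windows of size k*i (the common reference both inner loops compute)
def cntG (cs : List Char) (k i : Nat) : Int :=
  ((List.range (cs.length + 1 - k * i)).countP (fun st => decide (goodW (slw cs (k * i) st) k)) : Int)


-- Tcnt changes only through the multiplicity of one char a
theorem Tcnt_update (cs w w' : List Char) (k : Nat) (a : Char) (ha : a ∈ cs.toFinset)
    (h : ∀ c, c ≠ a → w'.count c = w.count c) :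
    Tcnt cs w' k = Tcnt cs w k +
      ((if k ≤ w'.count a then (1 : Int) else 0) - (if k ≤ w.count a then (1 : Int) else 0)) := by
  unfold Tcnt
  rw [← Finset.add_sum_erase _ _ ha, ← Finset.add_sum_erase _ _ ha]
  have hrest : ∑ c ∈ cs.toFinset.erase a, (if k ≤ w'.count c then (1 : Int) else 0)
      = ∑ c ∈ cs.toFinset.erase a, (if k ≤ w.count c then (1 : Int) else 0) :=
    Finset.sum_congr rfl (fun c hc => by rw [h c (Finset.ne_of_mem_erase hc)])
  rw [hrest]; ring

-- appending one char bumps Tcnt exactly when that char's multiplicity lands on k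
theorem Tcnt_snoc (cs w : List Char) (k : Nat) (hk : 1 ≤ k) (a : Char) (ha : a ∈ cs.toFinset) :
    Tcnt cs (w ++ [a]) k = Tcnt cs w k + (if (w ++ [a]).count a = k then 1 else 0) := by
  rw [Tcnt_update cs w (w ++ [a]) k a ha
      (fun c hc => by simp [List.count_append, List.count_singleton, Ne.symm hc])]
  have hc : (w ++ [a]).count a = w.count a + 1 := by simp [List.count_append]
  rw [hc]; split_ifs <;> omega

-- removing the head char drops Tcnt exactly when its multiplicity leaves k
theorem Tcnt_uncons (cs w : List Char) (k : Nat) (hk : 1 ≤ k) (a : Char) (ha : a ∈ cs.toFinset) :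
    Tcnt cs w k = Tcnt cs (a :: w) k - (if (a :: w).count a = k then 1 else 0) := by
  rw [Tcnt_update cs (a :: w) w k a ha
      (fun c hc => by simp [List.count_cons, Ne.symm hc])]
  have hc : (a :: w).count a = w.count a + 1 := by simp [List.count_cons]
  rw [hc]; split_ifs <;> omega

-- the core counting fact behind A: temp_count == i iff the window is full and every present char occurs exactly k times
theorem Tcnt_eq_iff (cs w : List Char) (k i : Nat) (hk : 1 ≤ k) (hi : 1 ≤ i)
    (hsub : ∀ c ∈ w, c ∈ cs.toFinset) (hlen : w.length ≤ k * i) :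
    Tcnt cs w k = (i : Int) ↔ (w.length = k * i ∧ goodW w k) := by
  have hsum : ∑ c ∈ cs.toFinset, (w.count c : Int) = (w.length : Int) := by
    have h0 : ∑ c ∈ cs.toFinset, w.count c = w.length := by
      rw [← List.sum_toFinset_count_eq_length w]
      exact (Finset.sum_subset
        (fun c hc => hsub c (List.mem_toFinset.mp hc))
        (fun c _ hc => List.count_eq_zero.mpr (fun hm => hc (List.mem_toFinset.mpr hm)))).symm
    exact_mod_cast congrArg (Nat.cast : Nat → Int) h0
  have hmulT : ∀ w' : List Char, (k : Int) * Tcnt cs w' k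
      = ∑ c ∈ cs.toFinset, ((k : Int) * (if k ≤ w'.count c then (1 : Int) else 0)) := by
    intro w'; unfold Tcnt; rw [Finset.mul_sum]
  constructor
  · intro hT
    have key : ∀ c ∈ cs.toFinset,
        (k : Int) * (if k ≤ w.count c then (1 : Int) else 0) ≤ (w.count c : Int) := by
      intro c _; split_ifs with h
      · push_cast; omega
      · positivity
    have hki : (k : Int) * Tcnt cs w k = (k : Int) * (i : Int) := by rw [hT]
    have hle2 : ∑ c ∈ cs.toFinset, ((k : Int) * (if k ≤ w.count c then (1 : Int) else 0))
        ≤ (w.length : Int) := hsum ▸ Finset.sum_le_sum key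
    have hlen2 : (w.length : Int) ≤ (k : Int) * (i : Int) := by push_cast; exact_mod_cast hlen
    have heq : ∑ c ∈ cs.toFinset, ((k : Int) * (if k ≤ w.count c then (1 : Int) else 0))
        = ∑ c ∈ cs.toFinset, (w.count c : Int) := by
      rw [hsum]
      have := hmulT w
      omega
    have hpt := (Finset.sum_eq_sum_iff_of_le key).mp heq
    have hlenEq : w.length = k * i := by
      have : (w.length : Int) = (k : Int) * (i : Int) := by
        have := hmulT w
        omega
      exact_mod_cast this
    refine ⟨hlenEq, fun c hc => ?_⟩
    have hmem := hsub c hc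
    have hcnt : 1 ≤ w.count c := List.count_pos_iff.mpr hc
    have h := (hpt c hmem).symm
    by_cases hge : k ≤ w.count c
    · simp [hge] at h
      exact_mod_cast h
    · simp [hge] at h
      omega
  · rintro ⟨hlenEq, hgood⟩
    have hpt : ∀ c ∈ cs.toFinset,
        (k : Int) * (if k ≤ w.count c then (1 : Int) else 0) = (w.count c : Int) := by
      intro c _
      by_cases hm : c ∈ w
      · rw [hgood c hm]; simp
      · rw [List.count_eq_zero.mpr hm]
        have : ¬ (k ≤ 0) := by omega
        simp [this]
    have : (k : Int) * Tcnt cs w k = (k : Int) * (i : Int) := by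
      rw [hmulT w, Finset.sum_congr rfl hpt, hsum]
      push_cast [hlenEq]
      ring
    have hk0 : (k : Int) ≠ 0 := by positivity
    exact mul_left_cancel₀ hk0 this

-- a full trailing window of the processed prefix is the slice starting at pre.length - size
theorem winP_full_eq_slw (cs pre suf : List Char) (size : Nat) (hcat : cs = pre ++ suf)
    (h : size ≤ pre.length) : winP pre size = slw cs size (pre.length - size) := by
  unfold winP slw
  rw [hcat, List.drop_append_of_le_length (by omega),
      List.take_left' (by simp; omega)]

-- A's res-increment test characterised: temp = i iff the trailing window is full and good
theorem res_iff (cs : List Char) (k i : Nat) (hk : 1 ≤ k) (hi : 1 ≤ i)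
    (pre suf : List Char) (hcat : cs = pre ++ suf) :
    (Tcnt cs (winP pre (k * i)) k = (i : Int))
      ↔ (k * i ≤ pre.length ∧ goodW (slw cs (k * i) (pre.length - k * i)) k) := by
  have hsub : ∀ c ∈ winP pre (k * i), c ∈ cs.toFinset := by
    intro c hc
    rw [List.mem_toFinset, hcat]
    exact List.mem_append_left _ (List.mem_of_mem_drop hc)
  have hlenw : (winP pre (k * i)).length = pre.length - (pre.length - k * i) := by
    unfold winP; simp
  have hlen : (winP pre (k * i)).length ≤ k * i := by omega
  rw [Tcnt_eq_iff cs _ k i hk hi hsub hlen]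
  constructor
  · rintro ⟨hl, hg⟩
    have hfull : k * i ≤ pre.length := by omega
    refine ⟨hfull, ?_⟩
    rw [← winP_full_eq_slw cs pre suf _ hcat hfull]
    exact hg
  · rintro ⟨hfull, hg⟩
    rw [winP_full_eq_slw cs pre suf _ hcat hfull]
    exact ⟨by rw [← winP_full_eq_slw cs pre suf _ hcat hfull]; omega, hg⟩

-- A's inner loop invariant: hash holds the trailing-window multiset, temp = Tcnt, res counts the good full windows seen
theorem A_loop (cs : List Char) (k i : Nat) (hk : 1 ≤ k) (hi : 1 ≤ i)
    (suf : List Char) (pre : List Char) (hcat : cs = pre ++ suf)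
    (hash : PySem.Dict Char Int) (temp res : Int)
    (hhash : ∀ c, hash.getD c 0 = ((winP pre (k * i)).count c : Int))
    (htemp : temp = Tcnt cs (winP pre (k * i)) k) :
    ((PySem.List.enumerate suf (pre.length : Int)).foldl
        (stepA cs (k : Int) ((k : Int) * (i : Int)) (i : Int)) (hash, temp, res)).2.2
      = res + ((List.range suf.length).countP (fun t =>
          decide (k * i ≤ pre.length + t + 1) &&
          decide (goodW (slw cs (k * i) (pre.length + t + 1 - k * i)) k)) : Int) := by
  induction suf generalizing pre hash temp res with
  | nil => simp [PySem.List.enumerate_nil]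
  | cons a suf' ih =>
    have hsz : 0 < k * i := Nat.mul_pos hk hi
    have hacs : a ∈ cs := by rw [hcat]; simp
    have haF : a ∈ cs.toFinset := List.mem_toFinset.mpr hacs
    have hcat' : cs = (pre ++ [a]) ++ suf' := by rw [hcat]; simp
    set w := winP pre (k * i) with hwdef
    rw [PySem.List.enumerate_cons, List.foldl_cons]
    have hhash1 : ∀ c, (hash.modify a 0 (· + 1)).getD c 0 = (((w ++ [a]).count c : Nat) : Int) := by
      intro c
      rw [PySem.Dict.getD_modify]
      by_cases hca : c = a
      · subst hca; rw [if_pos rfl, hhash]; push_cast [List.count_append]; simp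
      · rw [if_neg hca, hhash]; push_cast [List.count_append]; simp [List.count_singleton, Ne.symm hca]
    have htemp1 : temp + (if (hash.modify a 0 (· + 1)).getD a 0 = ((k : Nat) : Int) then (1 : Int) else 0)
        = Tcnt cs (w ++ [a]) k := by
      rw [htemp, Tcnt_snoc cs w k hk a haF, hhash1 a]
      norm_cast
    have hfin : ∀ r : Int,
        (if Tcnt cs (winP (pre ++ [a]) (k * i)) k = (i : Int) then r + 1 else r)
          + ((List.range suf'.length).countP (fun t =>
              decide (k * i ≤ (pre ++ [a]).length + t + 1) &&
              decide (goodW (slw cs (k * i) ((pre ++ [a]).length + t + 1 - k * i)) k)) : Int)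
        = r + ((List.range (a :: suf').length).countP (fun t =>
              decide (k * i ≤ pre.length + t + 1) &&
              decide (goodW (slw cs (k * i) (pre.length + t + 1 - k * i)) k)) : Int) := by
      intro r
      have hiff := res_iff cs k i hk hi (pre ++ [a]) suf' hcat'
      have hlen1 : (pre ++ [a]).length = pre.length + 1 := by simp
      have hshift : (List.range (suf'.length + 1)).countP (fun t =>
            decide (k * i ≤ pre.length + t + 1) &&
            decide (goodW (slw cs (k * i) (pre.length + t + 1 - k * i)) k))
          = ((if k * i ≤ pre.length + 1 ∧ goodW (slw cs (k * i) (pre.length + 1 - k * i)) k then 1 else 0)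
            + (List.range suf'.length).countP (fun t =>
              decide (k * i ≤ pre.length + 1 + t + 1) &&
              decide (goodW (slw cs (k * i) (pre.length + 1 + t + 1 - k * i)) k))) := by
        rw [List.range_succ_eq_map, List.countP_cons, List.countP_map]
        have hcomp : ((fun t => decide (k * i ≤ pre.length + t + 1) &&
              decide (goodW (slw cs (k * i) (pre.length + t + 1 - k * i)) k)) ∘ Nat.succ)
            = (fun t => decide (k * i ≤ pre.length + 1 + t + 1) &&
              decide (goodW (slw cs (k * i) (pre.length + 1 + t + 1 - k * i)) k)) := by
          funext t
          simp only [Function.comp_apply]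
          have e1 : pre.length + Nat.succ t + 1 = pre.length + 1 + t + 1 := by omega
          rw [e1]
        rw [hcomp]
        have e0 : pre.length + 0 + 1 = pre.length + 1 := by omega
        simp only [e0, Bool.and_eq_true, decide_eq_true_eq]
        split_ifs with h1 <;> omega
      simp only [List.length_cons, hlen1, hshift]
      push_cast
      by_cases hcond : k * i ≤ pre.length + 1 ∧ goodW (slw cs (k * i) (pre.length + 1 - k * i)) k
      · rw [if_pos ((hiff.mpr) (by simpa [hlen1] using hcond)), if_pos hcond]; ring
      · rw [if_neg (fun h => hcond (by simpa [hlen1] using hiff.mp h)), if_neg hcond]; ring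
    by_cases hfull : k * i ≤ pre.length
    · -- eviction branch
      have hfullI : ((k : Nat) : Int) * ((i : Nat) : Int) ≤ ((pre.length : Nat) : Int) := by
        exact_mod_cast hfull
      set m := pre.length - k * i with hm
      have hmlt : m < pre.length := by omega
      have hidx : ((pre.length : Nat) : Int) - ((k : Nat) : Int) * ((i : Nat) : Int) = ((m : Nat) : Int) := by
        push_cast; omega
      have hc0 : PySem.List.pyGetD cs (((pre.length : Nat) : Int) - ((k : Nat) : Int) * ((i : Nat) : Int)) ' '
          = pre[m] := by
        rw [hidx, PySem.List.pyGetD_natCast, hcat, List.getD_append _ _ _ _ (by omega), List.getD_eq_getElem _ _ hmlt]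
      have hw2 : winP (pre ++ [a]) (k * i) = pre.drop (m + 1) ++ [a] := by
        unfold winP
        rw [List.length_append, List.length_singleton,
            show pre.length + 1 - k * i = m + 1 from by omega]
        exact List.drop_append_of_le_length (by omega)
      have hkey : w ++ [a] = pre[m] :: (pre.drop (m + 1) ++ [a]) := by
        rw [hwdef]
        unfold winP
        rw [← hm, List.drop_eq_getElem_cons hmlt]
        rfl
      have hpmF : pre[m] ∈ cs.toFinset := by
        rw [List.mem_toFinset, hcat]
        exact List.mem_append_left _ (List.getElem_mem hmlt)
      simp only [stepA]
      rw [if_pos hfullI, hc0]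
      have hhash2 : ∀ c, ((hash.modify a 0 (· + 1)).modify pre[m] 0 (· - 1)).getD c 0
          = (((pre.drop (m + 1) ++ [a]).count c : Nat) : Int) := by
        intro c
        rw [PySem.Dict.getD_modify]
        by_cases hcp : c = pre[m]
        · subst hcp
          rw [if_pos rfl, hhash1, hkey, List.count_cons_self]
          push_cast; ring
        · rw [if_neg hcp, hhash1, hkey]; simp [List.count_cons, Ne.symm hcp]
      have htemp2 : (temp + (if (hash.modify a 0 (· + 1)).getD a 0 = ((k : Nat) : Int) then (1 : Int) else 0))
            - (if (hash.modify a 0 (· + 1)).getD pre[m] 0 = ((k : Nat) : Int) then (1 : Int) else 0)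
          = Tcnt cs (winP (pre ++ [a]) (k * i)) k := by
        rw [htemp1, hw2, Tcnt_uncons cs (pre.drop (m + 1) ++ [a]) k hk pre[m] hpmF, ← hkey, hhash1]
        norm_cast
      rw [show ((pre.length : Nat) : Int) + 1 = (((pre ++ [a]).length : Nat) : Int) from by push_cast; simp]
      rw [ih (pre ++ [a]) hcat' _ _ _ (by simpa [hw2] using hhash2) (by simpa using htemp2)]
      rw [show (temp + (if (hash.modify a 0 (· + 1)).getD a 0 = ((k : Nat) : Int) then (1 : Int) else 0))
            - (if (hash.modify a 0 (· + 1)).getD pre[m] 0 = ((k : Nat) : Int) then (1 : Int) else 0)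
          = Tcnt cs (winP (pre ++ [a]) (k * i)) k from htemp2]
      exact hfin res
    · -- no eviction: the window just grows
      have hfullI : ¬ ((k : Nat) : Int) * ((i : Nat) : Int) ≤ ((pre.length : Nat) : Int) := by
        push_cast
        exact_mod_cast fun h => hfull (by exact_mod_cast h)
      have hw2 : winP (pre ++ [a]) (k * i) = w ++ [a] := by
        rw [hwdef]
        unfold winP
        rw [List.length_append, List.length_singleton,
            show pre.length + 1 - k * i = 0 from by omega,
            show pre.length - k * i = 0 from by omega]
        simp
      simp only [stepA]
      rw [if_neg hfullI]
      have htemp2 : temp + (if (hash.modify a 0 (· + 1)).getD a 0 = ((k : Nat) : Int) then (1 : Int) else 0)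
          = Tcnt cs (winP (pre ++ [a]) (k * i)) k := by rw [htemp1, hw2]
      rw [show ((pre.length : Nat) : Int) + 1 = (((pre ++ [a]).length : Nat) : Int) from by push_cast; simp]
      rw [ih (pre ++ [a]) hcat' _ _ _ (by simpa [hw2] using hhash1) (by simpa using htemp2)]
      rw [show temp + (if (hash.modify a 0 (· + 1)).getD a 0 = ((k : Nat) : Int) then (1 : Int) else 0)
          = Tcnt cs (winP (pre ++ [a]) (k * i)) k from htemp2]
      exact hfin res

-- reindexing: windows by right edge j vs by start j+1-size
theorem countP_shift (n size : Nat) (hsz : 1 ≤ size) (f : Nat → Bool) :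
    (List.range n).countP (fun j => decide (size ≤ j + 1) && f (j + 1 - size))
      = (List.range (n + 1 - size)).countP f := by
  induction n with
  | zero =>
    have h0 : 0 + 1 - size = 0 := by omega
    simp [h0]
  | succ n ih =>
    rw [List.range_succ, List.countP_append, ih]
    by_cases hle : size ≤ n + 1
    · have h1 : n + 1 + 1 - size = (n + 1 - size) + 1 := by omega
      rw [h1, List.range_succ, List.countP_append]
      simp [hle]
    · have h1 : n + 1 + 1 - size = n + 1 - size := by omega
      rw [h1]
      simp [hle]

-- A's inner loop computes cntG
theorem bodyA_eq (cs : List Char) (k i : Nat) (hk : 1 ≤ k) (hi : 1 ≤ i) (res : Int) :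
    bodyA cs (k : Int) (i : Int) res = res + cntG cs k i := by
  simp only [bodyA]
  have hhash : ∀ c : Char, (PySem.Dict.empty : PySem.Dict Char Int).getD c 0
      = (((winP ([] : List Char) (k * i)).count c : Nat) : Int) := by
    intro c; simp [winP, PySem.Dict.getD_empty]
  have htemp : (0 : Int) = Tcnt cs (winP ([] : List Char) (k * i)) k := by
    unfold Tcnt winP
    rw [Finset.sum_eq_zero]
    intro c _
    simp
    omega
  have h := A_loop cs k i hk hi cs [] (by simp) PySem.Dict.empty 0 res hhash htemp
  simp only [List.length_nil, Nat.cast_zero, Nat.zero_add] at h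
  have hcnt : (List.range cs.length).countP
        (fun t => decide (k * i ≤ t + 1) && decide (goodW (slw cs (k * i) (t + 1 - k * i)) k))
      = (List.range (cs.length + 1 - k * i)).countP (fun st => decide (goodW (slw cs (k * i) st) k)) :=
    countP_shift cs.length (k * i) (Nat.mul_pos hk hi) (fun st => decide (goodW (slw cs (k * i) st) k))
  rw [h]
  unfold cntG
  rw [hcnt]

-- B's inner loop computes cntG
theorem bodyB_eq (cs : List Char) (k i : Nat) (hk : 1 ≤ k) (hi : 1 ≤ i)
    (hsize : k * i ≤ cs.length) (res : Int) :
    bodyB cs (k : Int) (i : Int) res = res + cntG cs k i := by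
  simp only [bodyB]
  have hb : (cs.length : Int) - (k : Int) * (i : Int) + 1 = ((cs.length + 1 - k * i : Nat) : Int) := by
    push_cast [Nat.cast_sub (by omega : k * i ≤ cs.length + 1)]; ring
  rw [hb, PySem.List.pyRange_zero_natCast, List.foldl_map]
  rw [PySem.List.foldl_congr_mem _ _
      (fun res st => res + (if goodW (slw cs (k * i) st) k then (1 : Int) else 0)) res ?_]
  · rw [PySem.List.foldl_add _ (fun st => if goodW (slw cs (k * i) st) k then (1 : Int) else 0) res]
    unfold cntG
    congr 1
    rw [show (fun st => if goodW (slw cs (k * i) st) k then (1 : Int) else 0)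
          = (fun st => if (fun st => decide (goodW (slw cs (k * i) st) k)) st = true then (1 : Int) else 0) by
        funext st; simp]
    rw [PySem.List.sum_map_ite_one_zero]
  · intro acc st hst
    have hmul : (k : Int) * (i : Int) = ((k * i : Nat) : Int) := by push_cast; ring
    rw [hmul, PySem.List.slice_natCast_add]
    set w := List.take (k * i) (List.drop st cs) with hw
    have hnd := PySem.Dict.nodup_keys_counter w
    have hcond : (List.all (PySem.Dict.counter w).values fun v => decide (v = ((k : Nat) : Int)))
        = decide (goodW w k) := by
      rw [PySem.Dict.values_eq_map_keys _ hnd 0, PySem.Dict.keys_counter, List.all_map]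
      apply Bool.eq_iff_iff.mpr
      simp only [List.all_eq_true, Function.comp_def, PySem.Dict.getD_counter,
        PySem.Set.mem_ofList, decide_eq_true_eq, Nat.cast_inj, goodW]
    rw [hcond]
    simp only [decide_eq_true_eq]
    rfl

-- a window of i distinct chars needs i distinct chars in s
theorem cntG_zero (cs : List Char) (k i : Nat) (hk : 1 ≤ k)
    (hσ : cs.toFinset.card < i) : cntG cs k i = 0 := by
  unfold cntG
  norm_cast
  rw [List.countP_eq_zero]
  intro st hst
  simp only [List.mem_range] at hst
  simp only [decide_eq_true_eq]
  intro hg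
  have hki : k * i ≤ cs.length := by omega
  have hlen : (slw cs (k * i) st).length = k * i := by
    unfold slw
    simp [List.length_take, List.length_drop]
    omega
  set w := slw cs (k * i) st with hw
  have hsum : ∑ c ∈ w.toFinset, w.count c = w.length := List.sum_toFinset_count_eq_length w
  have hconst : ∑ c ∈ w.toFinset, w.count c = w.toFinset.card * k := by
    rw [Finset.sum_congr rfl (fun c hc => hg c (List.mem_toFinset.mp hc))]
    simp [Finset.sum_const, Nat.smul_one_eq_cast]
  have hcard : w.toFinset.card = i := by
    have : w.toFinset.card * k = k * i := by omega
    have hk0 : 0 < k := hk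
    nlinarith
  have hsub : w.toFinset ⊆ cs.toFinset := by
    intro c hc
    rw [List.mem_toFinset] at hc ⊢
    exact List.mem_of_mem_drop (List.mem_of_mem_take hc)
  have := Finset.card_le_card hsub
  omega

-- len(set(s)) is the number of distinct chars
theorem setLen_eq (cs : List Char) : (PySem.Set.ofList cs).length = cs.toFinset.card := by
  have h1 : (PySem.Set.ofList cs).Nodup := PySem.Set.nodup_ofList cs
  have h2 : (PySem.Set.ofList cs).toFinset = cs.toFinset := by
    ext c; simp [PySem.Set.mem_ofList]
  rw [← h2, List.toFinset_card_of_nodup h1]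

-- negative count: no window sizes at all
theorem floordiv_nonpos (n : Nat) (b : Int) (hb : b < 0) : PySem.Int.floordiv (n : Int) b ≤ 0 := by
  have h := PySem.Int.floordiv_mul_add_mod (n : Int) b
  have h2 := PySem.Int.mod_neg_bounds (a := (n : Int)) hb
  nlinarith [h2.1, h2.2, Int.natCast_nonneg n]

theorem equalCountSubstrings_spec : Claim_equal_equalCountSubstrings := by
  intro s count _ hpre
  simp only [Spec_equalCountSubstrings, equalCountSubstrings, equalCountSubstrings_alt]
  set cs := s.toList with hcs
  rcases lt_trichotomy count 0 with hneg | hz | hpos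
  · -- count < 0 : both outer ranges are empty
    have hq : PySem.Int.floordiv (cs.length : Int) count ≤ 0 := floordiv_nonpos _ _ hneg
    rw [PySem.List.pyRange_one_eq_nil (by omega),
        PySem.List.pyRange_one_eq_nil (by simp; omega)]
    rfl
  · exact absurd hz hpre
  · -- count = k ≥ 1
    obtain ⟨k, rfl⟩ : ∃ k : Nat, count = (k : Int) := ⟨count.toNat, (Int.toNat_of_nonneg hpos.le).symm⟩
    have hk : 1 ≤ k := by exact_mod_cast hpos
    rw [PySem.Int.floordiv_natCast]
    set n := cs.length with hn
    set q := n / k with hq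
    set σ := (PySem.Set.ofList cs).length with hσdef
    rw [show min (σ : Int) (q : Int) = ((min σ q : Nat) : Int) from by rw [Nat.cast_min]]
    have hcA : ∀ (acc : Int), ∀ iZ ∈ PySem.List.pyRange 1 (((min σ q : Nat) : Int) + 1) 1,
        bodyA cs (k : Int) iZ acc = acc + cntG cs k iZ.toNat := by
      intro acc iZ hiZ
      rw [PySem.List.mem_pyRange_one] at hiZ
      obtain ⟨j, rfl⟩ : ∃ j : Nat, iZ = (j : Int) := ⟨iZ.toNat, (Int.toNat_of_nonneg (by omega)).symm⟩
      rw [bodyA_eq cs k j hk (by exact_mod_cast hiZ.1)]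
      simp
    have hcB : ∀ (acc : Int), ∀ iZ ∈ PySem.List.pyRange 1 ((q : Int) + 1) 1,
        bodyB cs (k : Int) iZ acc = acc + cntG cs k iZ.toNat := by
      intro acc iZ hiZ
      rw [PySem.List.mem_pyRange_one] at hiZ
      obtain ⟨j, rfl⟩ : ∃ j : Nat, iZ = (j : Int) := ⟨iZ.toNat, (Int.toNat_of_nonneg (by omega)).symm⟩
      have hjq : j ≤ q := by exact_mod_cast (by omega : (j : Int) ≤ (q : Int))
      have hsize : k * j ≤ n := by
        rw [Nat.mul_comm]
        exact (Nat.le_div_iff_mul_le (by omega)).mp hjq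
      rw [bodyB_eq cs k j hk (by exact_mod_cast hiZ.1) hsize]
      simp
    have hA := PySem.List.foldl_congr_mem (PySem.List.pyRange 1 (((min σ q : Nat) : Int) + 1) 1)
        (fun res i => bodyA cs ((k : Nat) : Int) i res) (fun acc iZ => acc + cntG cs k iZ.toNat) 0 hcA
    have hB := PySem.List.foldl_congr_mem (PySem.List.pyRange 1 (((q : Nat) : Int) + 1) 1)
        (fun res i => bodyB cs ((k : Nat) : Int) i res) (fun acc iZ => acc + cntG cs k iZ.toNat) 0 hcB
    rw [hA, hB]
    rw [PySem.List.foldl_add, PySem.List.foldl_add]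
    rw [PySem.List.pyRange_one_append 1 (((min σ q : Nat) : Int) + 1) ((q : Int) + 1)
        (by have := Nat.zero_le (min σ q); omega)
        (by have := Nat.min_le_right σ q; omega)]
    rw [List.map_append, List.sum_append]
    have hz : ((PySem.List.pyRange (((min σ q : Nat) : Int) + 1) ((q : Int) + 1) 1).map
        (fun iZ => cntG cs k iZ.toNat)).sum = 0 := by
      apply List.sum_eq_zero
      intro x hx
      simp only [List.mem_map] at hx
      obtain ⟨iZ, hiZ, rfl⟩ := hx
      rw [PySem.List.mem_pyRange_one] at hiZ
      apply cntG_zero cs k _ hk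
      rw [← setLen_eq, ← hσdef]
      omega
    rw [hz, add_zero]
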